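-- pv_equiv track=rewrite | github.com/nermadie/CodeForces_Solutions | CodeforcesRound928Div4/prob04.py | solve
-- ===== SOURCE A (Python) =====
-- def solve(n, a):
--     count_pair = 0
--     checked_dict = {}
--     for i in range(n):
--         checked_dict.setdefault(a[i], 0)
--         checked_dict.setdefault(a[i] ^ ((1 << 31) - 1), 0)
--         if checked_dict[a[i]] > 0:
--             count_pair += 1
--             checked_dict[a[i]] -= 1
--         else:
--             checked_dict[a[i] ^ ((1 << 31) - 1)] += 1
--     return n - count_pair
-- ===== SOURCE B (Python) =====
-- def solve(n, a):
--     mask = (1 << 31) - 1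
--     cnt = {}
--     for i in range(n):
--         cnt[a[i]] = cnt.get(a[i], 0) + 1
--     pairs = 0
--     for v in cnt:
--         if v < v ^ mask:
--             pairs += min(cnt[v], cnt.get(v ^ mask, 0))
--     return n - pairs
-- ===== Notes on version B (the rewrite author's own statement) =====
-- stated objective: simpler
-- what changed: Replaces the online greedy matching with a pending-complement dict by a count-first formulation: build a frequency dict in one pass, then for each distinct value v with v < v^mask add min(count[v], count[v^mask]) to the number of pairs, returning n - pairs.
import Mathlib
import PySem

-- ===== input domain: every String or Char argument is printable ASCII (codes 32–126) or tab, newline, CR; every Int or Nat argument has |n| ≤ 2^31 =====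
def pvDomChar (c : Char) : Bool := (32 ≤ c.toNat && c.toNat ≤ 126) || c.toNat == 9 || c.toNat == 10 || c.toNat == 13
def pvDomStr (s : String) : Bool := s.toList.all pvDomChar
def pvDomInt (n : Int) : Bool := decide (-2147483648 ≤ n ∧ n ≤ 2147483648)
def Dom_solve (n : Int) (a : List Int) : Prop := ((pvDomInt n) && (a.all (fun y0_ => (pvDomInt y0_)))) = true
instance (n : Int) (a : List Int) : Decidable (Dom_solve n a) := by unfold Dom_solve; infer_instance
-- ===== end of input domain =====

-- B replaces A's online greedy matching (pending-complement dict) by a count-first formulation: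
-- build a frequency dict, then pair complementary values by min of counts (objective: simpler).

-- ===== PORT A =====
-- loop body of A, abstracted over the current element x = a[i]; (1 << 31) - 1 = 2147483647
def solveStep (st : PySem.Dict Int Int × Int) (x : Int) : PySem.Dict Int Int × Int :=
  let d1 := (st.1.setdefault x 0).setdefault (PySem.Int.bxor x 2147483647) 0
  -- after the two setdefaults both keys exist, so Python's checked_dict[...] is getD _ 0
  if d1.getD x 0 > 0 then
    (d1.insert x (d1.getD x 0 - 1), st.2 + 1)
  else
    (d1.insert (PySem.Int.bxor x 2147483647) (d1.getD (PySem.Int.bxor x 2147483647) 0 + 1), st.2)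

-- a[i] is ported as pyGetD a i 0: exact because Pre_solve guarantees 0 ≤ i < len a (else Python raises IndexError)
def solve (n : Int) (a : List Int) : Int :=
  n - ((PySem.List.pyRange 0 n 1).foldl (fun st i => solveStep st (PySem.List.pyGetD a i 0)) (PySem.Dict.empty, 0)).2

-- ===== PORT B =====
def solve_alt (n : Int) (a : List Int) : Int :=
  let cnt := (PySem.List.pyRange 0 n 1).foldl
      (fun (d : PySem.Dict Int Int) i =>
        d.insert (PySem.List.pyGetD a i 0) (d.getD (PySem.List.pyGetD a i 0) 0 + 1))
      PySem.Dict.empty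
  -- cnt[v] is getD v 0 (v is a key of cnt); cnt.get(comp, 0) is getD comp 0
  let pairs := cnt.keys.foldl (fun s v =>
      if v < PySem.Int.bxor v 2147483647 then
        s + min (cnt.getD v 0) (cnt.getD (PySem.Int.bxor v 2147483647) 0)
      else s) 0
  n - pairs

-- ===== PRECONDITION & SPEC =====
-- Pre_ excludes only n > len(a), where A raises IndexError (a[i] out of range); it excludes no input A returns on.
def Pre_solve (n : Int) (a : List Int) : Prop := n ≤ (a.length : Int)
instance (n : Int) (a : List Int) : Decidable (Pre_solve n a) := by unfold Pre_solve; infer_instance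
def pvWitness_solve : Int × List Int := (3, [1, 2147483646, 5])

def Spec_solve (n : Int) (a : List Int) (out : Int) : Prop := out = solve_alt n a
instance (n : Int) (a : List Int) (out : Int) : Decidable (Spec_solve n a out) := by unfold Spec_solve; infer_instance

-- ===== CLAIM (what is proved, stated in full; the proofs are below) =====
def Claim_equal_solve : Prop := ∀ (n : Int) (a : List Int), Dom_solve n a → Pre_solve n a → Spec_solve n a (solve n a)

-- ===== LEMMAS AND PROOFS =====

-- the complement function x ^ ((1 << 31) - 1)
def cmask (v : Int) : Int := PySem.Int.bxor v 2147483647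

lemma bxor_mask_eq_cmask (v : Int) : PySem.Int.bxor v 2147483647 = cmask v := rfl

lemma bxor_invol (a m : Int) (hm : 0 ≤ m) : PySem.Int.bxor (PySem.Int.bxor a m) m = a := by
  unfold PySem.Int.bxor
  simp only [if_pos hm]
  by_cases h : 0 ≤ a
  · rw [if_pos h, if_pos (Int.natCast_nonneg _), Int.toNat_natCast, Nat.xor_xor_cancel_right]
    omega
  · rw [if_neg h]
    have h2 : ¬ (0:Int) ≤ -((((-a - 1).toNat ^^^ m.toNat : Nat) : Int)) - 1 := by
      have := Int.natCast_nonneg (((-a - 1).toNat ^^^ m.toNat : Nat)); omega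
    rw [if_neg h2]
    have h3 : (-(-(((-a - 1).toNat ^^^ m.toNat : Nat) : Int) - 1) - 1) = (((-a - 1).toNat ^^^ m.toNat : Nat) : Int) := by omega
    rw [h3, Int.toNat_natCast, Nat.xor_xor_cancel_right]
    omega

lemma bxor_ne (a m : Int) (hm : 0 < m) : PySem.Int.bxor a m ≠ a := by
  intro hv
  unfold PySem.Int.bxor at hv
  rw [if_pos hm.le] at hv
  by_cases h : 0 ≤ a
  · rw [if_pos h] at hv
    have hn : a.toNat ^^^ m.toNat = a.toNat := by omega
    have := congrArg (fun t => a.toNat ^^^ t) hn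
    simp at this
    omega
  · rw [if_neg h] at hv
    have hn : (-a - 1).toNat ^^^ m.toNat = (-a - 1).toNat := by omega
    have := congrArg (fun t => (-a - 1).toNat ^^^ t) hn
    simp at this
    omega

lemma cmask_invol (v : Int) : cmask (cmask v) = v := bxor_invol v 2147483647 (by norm_num)

lemma cmask_ne (v : Int) : cmask v ≠ v := bxor_ne v 2147483647 (by norm_num)


lemma fold_range_take {β : Type} (f : β → Int → β) (init : β) (n : Int) (a : List Int)
    (h : n ≤ (a.length : Int)) :
    (PySem.List.pyRange 0 n 1).foldl (fun acc i => f acc (PySem.List.pyGetD a i 0)) init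
      = (a.take n.toNat).foldl f init := by
  by_cases hn : n ≤ 0
  · rw [PySem.List.pyRange_one_eq_nil hn]
    have : n.toNat = 0 := by omega
    simp [this]
  · rw [not_le] at hn
    have hlen : (a.take n.toNat).length = n.toNat := by
      rw [List.length_take]; omega
    have hcast : ((a.take n.toNat).length : Int) = n := by rw [hlen]; omega
    calc (PySem.List.pyRange 0 n 1).foldl (fun acc i => f acc (PySem.List.pyGetD a i 0)) init
        = (PySem.List.pyRange 0 n 1).foldl (fun acc i => f acc (PySem.List.pyGetD (a.take n.toNat) i 0)) init := by
          apply PySem.List.foldl_congr_mem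
          intro acc x hx
          rw [PySem.List.mem_pyRange_one] at hx
          rw [PySem.List.pyGetD_eq_getElem a 0 hx.1 (by omega),
              PySem.List.pyGetD_eq_getElem (a.take n.toNat) 0 hx.1 (by omega)]
          congr 1
          rw [List.getElem_take]
      _ = (a.take n.toNat).foldl f init := by
          generalize a.take n.toNat = t at hcast ⊢
          rw [← hcast]
          exact PySem.List.foldl_pyRange_zero_pyGetD' t 0 f init

def greedy (xs : List Int) : PySem.Dict Int Int × Int := xs.foldl solveStep (PySem.Dict.empty, 0)

lemma getD0_setdefault (d : PySem.Dict Int Int) (k y : Int) :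
    (d.setdefault k 0).getD y 0 = d.getD y 0 := by
  by_cases hy : y = k
  · rw [hy]; exact PySem.Dict.getD_setdefault_self d k 0 0
  · rw [PySem.Dict.getD_eq_get?_getD,
        @PySem.Dict.get?_setdefault_of_ne _ _ _ _ d k y 0 hy,
        ← PySem.Dict.getD_eq_get?_getD]

lemma greedy_append (xs : List Int) (x : Int) :
    greedy (xs ++ [x]) = solveStep (greedy xs) x := by
  unfold greedy; rw [List.foldl_append]; rfl

lemma count_append_singleton (xs : List Int) (x v : Int) :
    (xs ++ [x]).count v = xs.count v + (if v = x then 1 else 0) := by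
  by_cases h : v = x
  · subst h; simp [List.count_append]
  · rw [List.count_append, if_neg h]
    have : List.count v [x] = 0 := by
      rw [List.count_eq_zero]
      simp [h]
    omega

lemma greedy_state (xs : List Int) : ∀ v,
    (greedy xs).1.getD v 0 = max ((xs.count (cmask v) : Int) - (xs.count v : Int)) 0 := by
  induction xs using List.reverseRecOn with
  | nil => intro v; simp [greedy, PySem.Dict.getD_empty]
  | append_singleton xs x ih =>
    intro v
    rw [greedy_append]
    unfold solveStep
    have hd1 : ∀ y, (((greedy xs).1.setdefault x 0).setdefault (cmask x) 0).getD y 0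
        = (greedy xs).1.getD y 0 := fun y => by rw [getD0_setdefault, getD0_setdefault]
    have hcc := cmask_invol x
    have hne := cmask_ne x
    have hbx : PySem.Int.bxor x 2147483647 = cmask x := rfl
    simp only [hbx]
    simp only [hd1]
    rw [count_append_singleton, count_append_singleton]
    by_cases hb : (greedy xs).1.getD x 0 > 0
    · rw [if_pos hb]
      dsimp only
      simp only [PySem.Dict.getD_insert, hd1]
      have hbc := ih x
      by_cases hvx : v = x
      · subst hvx
        rw [if_pos rfl, hbc, if_neg hne, if_pos rfl]
        omega
      · by_cases hvc : v = cmask x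
        · subst hvc
          rw [if_neg hne, ih (cmask x), hcc, if_pos rfl, if_neg hne]
          rw [hbc] at hb
          omega
        · have hcvx : ¬ cmask v = x := fun h => hvc (by rw [← h, cmask_invol])
          rw [if_neg hvx, ih v, if_neg hcvx, if_neg hvx]
          omega
    · rw [if_neg hb]
      dsimp only
      simp only [PySem.Dict.getD_insert, hd1]
      have hbc := ih x
      rw [hbc] at hb
      by_cases hvc : v = cmask x
      · subst hvc
        rw [if_pos rfl, ih (cmask x), hcc, if_pos rfl, if_neg hne]
        omega
      · by_cases hvx : v = x
        · subst hvx
          rw [if_neg (Ne.symm hne), hbc, if_neg hne, if_pos rfl]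
          omega
        · have hcvx : ¬ cmask v = x := fun h => hvc (by rw [← h, cmask_invol])
          rw [if_neg hvc, ih v, if_neg hcvx, if_neg hvx]
          omega

def tfun (xs : List Int) (v : Int) : Int :=
  if v < cmask v then min ((xs.count v : Int)) ((xs.count (cmask v) : Int)) else 0

lemma sum_map_congr_two (L : List Int) (hL : L.Nodup) (f g : Int → Int) (u w : Int) (huw : u ≠ w)
    (h : ∀ v, v ≠ u → v ≠ w → f v = g v) :
    (L.map f).sum = (L.map g).sum + (if u ∈ L then f u - g u else 0)
      + (if w ∈ L then f w - g w else 0) := by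
  induction L with
  | nil => simp
  | cons a L ih =>
    rw [List.nodup_cons] at hL
    have ihL := ih hL.2
    simp only [List.map_cons, List.sum_cons, List.mem_cons, ihL]
    by_cases hau : u = a
    · have huL : ¬ u ∈ L := by rw [hau]; exact hL.1
      have hwa : ¬ w = a := fun hh => huw (by rw [hau, ← hh])
      rw [if_neg huL, if_pos (Or.inl hau)]
      by_cases hwL : w ∈ L
      · rw [if_pos hwL, if_pos (Or.inr hwL), hau]; ring
      · rw [if_neg hwL, if_neg (fun hh : w = a ∨ w ∈ L => hh.elim hwa hwL), hau]; ring
    · by_cases haw : w = a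
      · have hwL : ¬ w ∈ L := by rw [haw]; exact hL.1
        rw [if_neg hwL, if_pos (Or.inl haw)]
        by_cases huL : u ∈ L
        · rw [if_pos huL, if_pos (Or.inr huL), haw]; ring
        · rw [if_neg huL, if_neg (fun hh : u = a ∨ u ∈ L => hh.elim hau huL), haw]; ring
      · have hfa : f a = g a := h a (fun hh => hau hh.symm) (fun hh => haw hh.symm)
        rw [hfa]
        by_cases huL : u ∈ L
        · rw [if_pos huL, if_pos (Or.inr huL : u = a ∨ u ∈ L)]
          by_cases hwL : w ∈ L
          · rw [if_pos hwL, if_pos (Or.inr hwL : w = a ∨ w ∈ L)]; ring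
          · rw [if_neg hwL, if_neg (fun hh : w = a ∨ w ∈ L => hh.elim haw hwL)]; ring
        · rw [if_neg huL, if_neg (fun hh : u = a ∨ u ∈ L => hh.elim hau huL)]
          by_cases hwL : w ∈ L
          · rw [if_pos hwL, if_pos (Or.inr hwL : w = a ∨ w ∈ L)]; ring
          · rw [if_neg hwL, if_neg (fun hh : w = a ∨ w ∈ L => hh.elim haw hwL)]; ring

lemma tfun_x (xs : List Int) (x : Int) :
    tfun (xs ++ [x]) x = if x < cmask x then min ((xs.count x : Int) + 1) ((xs.count (cmask x) : Int)) else 0 := by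
  unfold tfun
  rw [count_append_singleton xs x x, count_append_singleton xs x (cmask x),
      if_pos rfl, if_neg (cmask_ne x)]
  push_cast
  split_ifs <;> omega

lemma tfun_cx (xs : List Int) (x : Int) :
    tfun (xs ++ [x]) (cmask x) = if cmask x < x then min ((xs.count (cmask x) : Int)) ((xs.count x : Int) + 1) else 0 := by
  unfold tfun
  rw [cmask_invol]
  rw [count_append_singleton xs x (cmask x), count_append_singleton xs x x,
      if_pos rfl, if_neg (cmask_ne x)]
  push_cast
  split_ifs <;> omega

lemma tfun_g_cx (xs : List Int) (x : Int) :
    tfun xs (cmask x) = if cmask x < x then min ((xs.count (cmask x) : Int)) ((xs.count x : Int)) else 0 := by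
  unfold tfun
  rw [cmask_invol]

lemma sum_step (xs : List Int) (x : Int) :
    ((PySem.Set.ofList (xs ++ [x])).map (tfun (xs ++ [x]))).sum
      = ((PySem.Set.ofList xs).map (tfun xs)).sum
        + (if ((xs.count x : Int)) < ((xs.count (cmask x) : Int)) then 1 else 0) := by
  have hcc := cmask_invol x
  have hne := cmask_ne x
  have hxw : x ≠ cmask x := fun h => hne h.symm
  have hcongr : ∀ v, v ≠ x → v ≠ cmask x → tfun (xs ++ [x]) v = tfun xs v := by
    intro v hvx hvc
    have hcvx : cmask v ≠ x := fun h => hvc (by rw [← h, cmask_invol])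
    unfold tfun
    rw [count_append_singleton xs x v, count_append_singleton xs x (cmask v),
        if_neg hvx, if_neg hcvx]
    simp
  have hmain := sum_map_congr_two (PySem.Set.ofList (xs ++ [x])) (PySem.Set.nodup_ofList _)
      (tfun (xs ++ [x])) (tfun xs) x (cmask x) hxw hcongr
  have hxS : x ∈ PySem.Set.ofList (xs ++ [x]) := by
    rw [PySem.Set.mem_ofList]; simp
  have hcS : (cmask x ∈ PySem.Set.ofList (xs ++ [x])) ↔ cmask x ∈ xs := by
    rw [PySem.Set.mem_ofList]; simp [hne]
  have hsplit : ((PySem.Set.ofList (xs ++ [x])).map (tfun xs)).sum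
      = ((PySem.Set.ofList xs).map (tfun xs)).sum + (if x ∈ xs then 0 else tfun xs x) := by
    rw [PySem.Set.ofList_append_singleton, PySem.Set.add_eq_ite]
    by_cases hx : x ∈ PySem.Set.ofList xs
    · rw [if_pos hx, if_pos (by rwa [PySem.Set.mem_ofList] at hx)]; ring
    · rw [if_neg hx, if_neg (fun hh => hx (by rwa [PySem.Set.mem_ofList])),
          List.map_append, List.sum_append]
      simp
  rw [hmain, hsplit, if_pos hxS, tfun_x, tfun_cx, tfun_g_cx]
  have htg : tfun xs x = if x < cmask x then min ((xs.count x : Int)) ((xs.count (cmask x) : Int)) else 0 := rfl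
  rw [htg]
  have hmem1 : x ∈ xs ↔ 0 < xs.count x := List.count_pos_iff.symm
  have hmem2 : cmask x ∈ xs ↔ 0 < xs.count (cmask x) := List.count_pos_iff.symm
  by_cases h1 : x ∈ xs
  · rw [if_pos h1]
    by_cases h2 : cmask x ∈ xs
    · rw [if_pos (hcS.mpr h2)]
      have := hmem2.mp h2
      split_ifs <;> omega
    · rw [if_neg (fun hh => h2 (hcS.mp hh))]
      have : xs.count (cmask x) = 0 := by
        by_contra hc; exact h2 (hmem2.mpr (by omega))
      split_ifs <;> omega
  · rw [if_neg h1]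
    have ha : xs.count x = 0 := by
      by_contra hc; exact h1 (hmem1.mpr (by omega))
    by_cases h2 : cmask x ∈ xs
    · rw [if_pos (hcS.mpr h2)]
      have := hmem2.mp h2
      split_ifs <;> omega
    · rw [if_neg (fun hh => h2 (hcS.mp hh))]
      have : xs.count (cmask x) = 0 := by
        by_contra hc; exact h2 (hmem2.mpr (by omega))
      split_ifs <;> omega

lemma greedy_count (xs : List Int) :
    (greedy xs).2 = ((PySem.Set.ofList xs).map (tfun xs)).sum := by
  induction xs using List.reverseRecOn with
  | nil => simp [greedy, PySem.Set.ofList]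
  | append_singleton xs x ih =>
    rw [greedy_append, sum_step, ← ih]
    unfold solveStep
    have hd1 : ∀ y, (((greedy xs).1.setdefault x 0).setdefault (cmask x) 0).getD y 0
        = (greedy xs).1.getD y 0 := fun y => by rw [getD0_setdefault, getD0_setdefault]
    have hbx : PySem.Int.bxor x 2147483647 = cmask x := rfl
    simp only [hbx, hd1]
    rw [greedy_state xs x]
    by_cases hb : ((xs.count (cmask x) : Int)) > ((xs.count x : Int))
    · rw [if_pos (by omega), if_pos (by omega)]
    · rw [if_neg (by omega), if_neg (by omega)]
      simp

lemma foldl_ite_add (L : List Int) (xs : List Int) (s : Int) :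
    L.foldl (fun s v => if v < cmask v then s + min ((xs.count v : Int)) ((xs.count (cmask v) : Int)) else s) s
      = s + (L.map (tfun xs)).sum := by
  induction L generalizing s with
  | nil => simp
  | cons a L ih =>
    rw [List.foldl_cons, List.map_cons, List.sum_cons, ih]
    unfold tfun
    by_cases h : a < cmask a
    · rw [if_pos h, if_pos h]; ring
    · rw [if_neg h, if_neg h]; ring

-- ===== VERDICT (by name: the statement is the Claim_ definition above) =====
theorem solve_spec : Claim_equal_solve := by
  unfold Claim_equal_solve
  intro n a _hdom hpre
  unfold Spec_solve
  have hpre' : n ≤ ((a.length : Nat) : Int) := hpre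
  have e1 : (PySem.List.pyRange 0 n 1).foldl (fun st i => solveStep st (PySem.List.pyGetD a i 0)) (PySem.Dict.empty, 0)
      = greedy (a.take n.toNat) := fold_range_take solveStep (PySem.Dict.empty, 0) n a hpre'
  have e2 : (PySem.List.pyRange 0 n 1).foldl
      (fun (d : PySem.Dict Int Int) i =>
        d.insert (PySem.List.pyGetD a i 0) (d.getD (PySem.List.pyGetD a i 0) 0 + 1))
      PySem.Dict.empty
      = PySem.Dict.counter (a.take n.toNat) := by
    have h := fold_range_take (fun (d : PySem.Dict Int Int) x => d.insert x (d.getD x 0 + 1)) PySem.Dict.empty n a hpre'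
    rw [PySem.Dict.foldl_insert_getD_add_one_eq_counter] at h
    exact h
  simp only [solve, solve_alt]
  rw [e1, e2, PySem.Dict.keys_counter]
  simp only [PySem.Dict.getD_counter, bxor_mask_eq_cmask]
  rw [foldl_ite_add, greedy_count]
  ring
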